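-- pv_equiv track=rewrite | github.com/benquick123/code-profiling | code/batch-2/vse-naloge-brez-testov/DN7-M-005.py | racunaj_smer
-- ===== SOURCE A (Python) =====
-- def racunaj_smer(smer, kam):
--     navodila_desno = 0
--     while smer != kam:
--         navodila_desno += 1
--         smer += 1
--         if smer == 4:
--             smer = 0
--     return navodila_desno * ["DESNO"], smer
-- ===== SOURCE B (Python) =====
-- def racunaj_smer(smer, kam):
--     if kam >= smer:
--         d = kam - smer
--     else:
--         d = 4 - smer + kam
--     return d * ["DESNO"], kam
-- ===== Notes on version B (the rewrite author's own statement) =====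
-- stated objective: simpler
-- what changed: Replaces the step-by-step wrap-at-4 rotation loop with a closed-form step count (kam - smer if kam >= smer, else 4 - smer + kam) and returns kam directly.
import Mathlib
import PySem

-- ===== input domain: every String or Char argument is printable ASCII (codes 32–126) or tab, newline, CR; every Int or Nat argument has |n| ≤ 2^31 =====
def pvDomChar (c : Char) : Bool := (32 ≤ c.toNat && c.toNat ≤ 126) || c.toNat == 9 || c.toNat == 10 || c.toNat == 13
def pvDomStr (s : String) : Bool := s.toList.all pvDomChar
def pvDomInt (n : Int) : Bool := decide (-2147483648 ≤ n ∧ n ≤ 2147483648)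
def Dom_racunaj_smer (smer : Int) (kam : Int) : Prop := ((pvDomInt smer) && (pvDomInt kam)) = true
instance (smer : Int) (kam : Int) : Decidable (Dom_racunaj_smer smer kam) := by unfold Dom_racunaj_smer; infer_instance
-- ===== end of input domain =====

-- B replaces A's step-by-step wrap-at-4 rotation loop with a closed-form step count (simpler).

-- ===== PORT A =====
-- A's while loop, with a fuel guard for totality; on every input admitted by
-- Pre_racunaj_smer the fuel is at least the number of loop iterations, so the
-- exhaustion branch is never taken there (A diverges exactly outside Pre_).
def racLoopA : Nat → Int → Int → Nat → List String × Int
  | 0, smer, _, navodila_desno => (List.replicate navodila_desno "DESNO", smer)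
  | fuel + 1, smer, kam, navodila_desno =>
      if smer = kam then (List.replicate navodila_desno "DESNO", smer)
      else
        let smer' := smer + 1
        racLoopA fuel (if smer' = 4 then 0 else smer') kam (navodila_desno + 1)

def racunaj_smer (smer : Int) (kam : Int) : List String × Int :=
  racLoopA ((kam - smer).toNat + (4 - smer + kam).toNat + 1) smer kam 0

-- ===== PORT B =====
def racunaj_smer_alt (smer : Int) (kam : Int) : List String × Int :=
  let d : Int := if kam ≥ smer then kam - smer else 4 - smer + kam
  (List.replicate d.toNat "DESNO", kam)

-- ===== PRECONDITION & SPEC =====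
-- Pre_ is exactly the set of inputs on which A's while loop terminates: the
-- target equals the start, or is reached before wrapping, or lies in the 0..3
-- cycle that any start ≤ 3 falls into. Outside Pre_ A loops forever.
def Pre_racunaj_smer (smer : Int) (kam : Int) : Prop :=
  kam = smer ∨ (smer < kam ∧ (kam ≤ 3 ∨ 4 ≤ smer)) ∨ (kam < smer ∧ smer ≤ 3 ∧ 0 ≤ kam)
instance (smer : Int) (kam : Int) : Decidable (Pre_racunaj_smer smer kam) := by
  unfold Pre_racunaj_smer; infer_instance

def pvWitness_racunaj_smer : Int × Int := (1, 3)

def Spec_racunaj_smer (smer : Int) (kam : Int) (out : List String × Int) : Prop := out = racunaj_smer_alt smer kam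
instance (smer : Int) (kam : Int) (out : List String × Int) : Decidable (Spec_racunaj_smer smer kam out) := by unfold Spec_racunaj_smer; infer_instance

-- ===== CLAIM (what is proved, stated in full; the proofs are below) =====
def Claim_equal_racunaj_smer : Prop := ∀ (smer : Int) (kam : Int), Dom_racunaj_smer smer kam → Pre_racunaj_smer smer kam → Spec_racunaj_smer smer kam (racunaj_smer smer kam)

-- ===== LEMMAS AND PROOFS =====

-- number of iterations of A's loop on a terminating input
def racSteps (smer kam : Int) : Nat :=
  (if smer ≤ kam then kam - smer else 4 - smer + kam).toNat

lemma racStep_next (smer kam : Int) (h : Pre_racunaj_smer smer kam) (hne : smer ≠ kam) :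
    Pre_racunaj_smer (if smer + 1 = 4 then 0 else smer + 1) kam ∧
    racSteps (if smer + 1 = 4 then 0 else smer + 1) kam + 1 = racSteps smer kam := by
  unfold Pre_racunaj_smer racSteps at *
  split_ifs at * <;> omega

lemma racSteps_self (k : Int) : racSteps k k = 0 := by
  unfold racSteps; simp

lemma racLoopA_eq (fuel : Nat) : ∀ (smer kam : Int) (acc : Nat),
    Pre_racunaj_smer smer kam → racSteps smer kam ≤ fuel →
    racLoopA fuel smer kam acc = (List.replicate (acc + racSteps smer kam) "DESNO", kam) := by
  induction fuel with
  | zero =>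
    intro smer kam acc h hle
    have hz : racSteps smer kam = 0 := Nat.le_zero.mp hle
    have heq : smer = kam := by
      unfold Pre_racunaj_smer at h; unfold racSteps at hz
      split_ifs at hz <;> omega
    simp [racLoopA, heq, racSteps_self]
  | succ f ih =>
    intro smer kam acc h hle
    by_cases heq : smer = kam
    · simp [racLoopA, heq, racSteps_self]
    · obtain ⟨hpre', hstep⟩ := racStep_next smer kam h heq
      have h1 : racSteps (if smer + 1 = 4 then 0 else smer + 1) kam + 1 ≤ f + 1 := hstep ▸ hle
      have hle' : racSteps (if smer + 1 = 4 then 0 else smer + 1) kam ≤ f :=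
        Nat.succ_le_succ_iff.mp h1
      simp only [racLoopA, heq]
      rw [ih _ _ _ hpre' hle']
      have hacc : acc + 1 + racSteps (if smer + 1 = 4 then 0 else smer + 1) kam
          = acc + racSteps smer kam := by omega
      rw [hacc]
      simp

lemma racSteps_le_fuel (smer kam : Int) :
    racSteps smer kam ≤ (kam - smer).toNat + (4 - smer + kam).toNat + 1 := by
  unfold racSteps; split_ifs <;> omega

lemma alt_eq (smer kam : Int) :
    racunaj_smer_alt smer kam = (List.replicate (racSteps smer kam) "DESNO", kam) := by
  unfold racunaj_smer_alt racSteps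
  by_cases h : smer ≤ kam
  · simp [h, ge_iff_le]
  · simp [h]

-- ===== VERDICT (by name: the statement is the Claim_ definition above) =====
theorem racunaj_smer_spec : Claim_equal_racunaj_smer := by
  intro smer kam _ hpre
  unfold Spec_racunaj_smer racunaj_smer
  rw [racLoopA_eq _ _ _ _ hpre (racSteps_le_fuel smer kam), alt_eq]
  simp
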